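-- pv_equiv track=rewrite | github.com/martinhova01/everybody-codes | 24/08/main.py | calc_needed_blocks
-- ===== SOURCE A (Python) =====
-- def calc_needed_blocks(layers, data, mod):
--     thickness = 1
--     blocks_needed = 1
--     width = 1
--     thicknesses = [1]
--
--     # add blocks
--     for _ in range(layers - 1):
--         width += 2
--         thickness = ((thickness * data) % mod) + mod
--         thicknesses.append(thickness)
--         blocks_needed += width * thickness
--
--     thicknesses = thicknesses[::-1]
--     heights = [sum(thicknesses[:i]) for i in range(1, len(thicknesses) + 1)]
--
--     # remove bottom blocks
--     empty = 0
--     for height in heights[1:-1]: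
--         empty += 2 * ((data * width * height) % mod)
--     empty += ((data * width * heights[-1]) % mod)
--     return blocks_needed - empty
-- ===== SOURCE B (Python) =====
-- def calc_needed_blocks(layers, data, mod):
--     thickness = 1
--     blocks_needed = 1
--     thicknesses = [1]
--
--     # add blocks (width of layer k is 2*k + 1)
--     for k in range(1, layers):
--         thickness = thickness * data % mod + mod
--         thicknesses.append(thickness)
--         blocks_needed += (2 * k + 1) * thickness
--
--     n = len(thicknesses)
--     width = 2 * n - 1
--
--     # remove bottom blocks: one pass over the reversed thicknesses with a
--     # running height instead of re-summing a prefix slice per column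
--     height = 0
--     empty = 0
--     for k, t in enumerate(reversed(thicknesses), 1):
--         height += t
--         if 2 <= k <= n - 1:
--             empty += 2 * (data * width * height % mod)
--     empty += data * width * height % mod
--     return blocks_needed - empty
-- ===== Notes on version B (the rewrite author's own statement) =====
-- stated objective: faster
-- what changed: B replaces the O(n^2) heights comprehension (re-summing a growing prefix slice per layer) and its two follow-up slice loops with one O(n) pass over the reversed thickness list that keeps a running height sum, and derives the width from the layer index instead of an accumulator.
import Mathlib
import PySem

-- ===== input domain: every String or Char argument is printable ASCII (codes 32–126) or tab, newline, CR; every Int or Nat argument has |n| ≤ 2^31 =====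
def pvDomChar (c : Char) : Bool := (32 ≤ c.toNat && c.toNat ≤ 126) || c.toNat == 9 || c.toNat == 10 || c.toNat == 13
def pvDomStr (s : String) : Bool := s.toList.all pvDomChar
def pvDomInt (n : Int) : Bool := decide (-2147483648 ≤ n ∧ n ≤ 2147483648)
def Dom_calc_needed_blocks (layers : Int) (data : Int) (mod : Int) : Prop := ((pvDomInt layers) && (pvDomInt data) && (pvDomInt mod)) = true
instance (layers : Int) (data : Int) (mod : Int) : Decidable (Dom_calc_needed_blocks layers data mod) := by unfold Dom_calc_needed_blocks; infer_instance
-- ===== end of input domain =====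

-- B: one O(n) running-height pass over the reversed thicknesses replaces A's O(n^2) prefix-slice re-summation.


-- loop bodies of the two ports, named so the lemmas below can refer to them
def pvStepA (data mod : Int) : (Int × Int × Int × List Int) → Int → (Int × Int × Int × List Int) :=
  fun st _ =>
    match st with
    | (thickness, blocks, width, ts) =>
      let width' := width + 2
      let thickness' := PySem.Int.mod (thickness * data) mod + mod
      (thickness', blocks + width' * thickness', width', ts ++ [thickness'])

def pvStepB (data mod : Int) : (Int × Int × List Int) → Int → (Int × Int × List Int) :=
  fun st k =>
    match st with
    | (thickness, blocks, ts) =>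
      let thickness' := PySem.Int.mod (thickness * data) mod + mod
      (thickness', blocks + (2 * k + 1) * thickness', ts ++ [thickness'])

def pvStepC (d w m n : Int) : (Int × Int) → (Int × Int) → (Int × Int) :=
  fun st p =>
    let height' := st.1 + p.2
    (height',
     if 2 ≤ p.1 ∧ p.1 ≤ n - 1 then st.2 + 2 * PySem.Int.mod (d * w * height') m else st.2)

-- ===== PORT A =====
def calc_needed_blocks (layers : Int) (data : Int) (mod : Int) : Int :=
  -- for _ in range(layers - 1): width += 2; thickness = thickness*data % mod + mod; append; blocks += width*thickness
  let s := (PySem.List.pyRange 0 (layers - 1) 1).foldl (pvStepA data mod) (1, 1, 1, [1])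
  match s with
  | (_, blocks, width, ts) =>
    -- thicknesses = thicknesses[::-1]
    let rev := (PySem.List.slice? ts none none (-1)).getD []
    -- heights = [sum(thicknesses[:i]) for i in range(1, len(thicknesses) + 1)]
    let heights := (PySem.List.pyRange 1 ((rev.length : Int) + 1) 1).map
      (fun i => (PySem.List.slice rev none (some i)).sum)
    -- for height in heights[1:-1]: empty += 2 * ((data*width*height) % mod)
    let empty := (PySem.List.slice heights (some 1) (some (-1))).foldl
      (fun e h => e + 2 * PySem.Int.mod (data * width * h) mod) 0
    -- empty += (data*width*heights[-1]) % mod   (heights is provably nonempty, so pyGetD is exact)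
    let empty := empty + PySem.Int.mod (data * width * PySem.List.pyGetD heights (-1) 0) mod
    blocks - empty

-- ===== PORT B =====
def calc_needed_blocks_alt (layers : Int) (data : Int) (mod : Int) : Int :=
  -- for k in range(1, layers): thickness = thickness*data % mod + mod; append; blocks += (2*k+1)*thickness
  let s := (PySem.List.pyRange 1 layers 1).foldl (pvStepB data mod) (1, 1, [1])
  match s with
  | (_, blocks, ts) =>
    let n : Int := ts.length
    let width := 2 * n - 1
    -- for k, t in enumerate(reversed(ts), 1): height += t; if 2 <= k <= n-1: empty += 2*(data*width*height % mod)
    let r := (PySem.List.enumerate ts.reverse 1).foldl (pvStepC data width mod n) (0, 0)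
    blocks - (r.2 + PySem.Int.mod (data * width * r.1) mod)

-- ===== PRECONDITION & SPEC =====
-- Pre_ excludes exactly mod = 0, where Python A raises ZeroDivisionError (as does B).
def Pre_calc_needed_blocks (layers : Int) (data : Int) (mod : Int) : Prop := mod ≠ 0
instance (layers : Int) (data : Int) (mod : Int) : Decidable (Pre_calc_needed_blocks layers data mod) := by unfold Pre_calc_needed_blocks; infer_instance
def pvWitness_calc_needed_blocks : Int × Int × Int := (3, 2, 5)

def Spec_calc_needed_blocks (layers : Int) (data : Int) (mod : Int) (out : Int) : Prop := out = calc_needed_blocks_alt layers data mod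
instance (layers : Int) (data : Int) (mod : Int) (out : Int) : Decidable (Spec_calc_needed_blocks layers data mod out) := by unfold Spec_calc_needed_blocks; infer_instance

-- ===== CLAIM (what is proved, stated in full; the proofs are below) =====
def Claim_equal_calc_needed_blocks : Prop := ∀ (layers : Int) (data : Int) (mod : Int), Dom_calc_needed_blocks layers data mod → Pre_calc_needed_blocks layers data mod → Spec_calc_needed_blocks layers data mod (calc_needed_blocks layers data mod)

-- ===== LEMMAS AND PROOFS =====

def pvBf (data mod : Int) (j : Nat) : Int × Int × List Int :=
  (PySem.List.pyRange 1 ((j : Int) + 1) 1).foldl (pvStepB data mod) (1, 1, [1])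

-- xs[1:-1] as tail/take
lemma pvSliceOneNegOne (xs : List Int) :
    PySem.List.slice xs (some 1) (some (-1)) = xs.tail.take (xs.length - 2) := by
  cases xs with
  | nil => simp [PySem.List.slice]
  | cons a l => simp [PySem.List.slice]

-- the two build loops produce the same thickness/blocks/thickness-list; A's width is 2*j+1
lemma pvBuild (data mod : Int) (j : Nat) :
    (PySem.List.pyRange 0 (j : Int) 1).foldl (pvStepA data mod) (1, 1, 1, [1])
      = ((pvBf data mod j).1, (pvBf data mod j).2.1, 2 * (j : Int) + 1, (pvBf data mod j).2.2)
    ∧ (pvBf data mod j).2.2.length = j + 1 := by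
  induction j with
  | zero => simp [pvBf, PySem.List.pyRange_one_eq_nil]
  | succ j ih =>
    obtain ⟨h1, h2⟩ := ih
    have hc : ((j + 1 : Nat) : Int) = (j : Int) + 1 := by push_cast; ring
    have ra : PySem.List.pyRange 0 ((j : Int) + 1) 1
        = PySem.List.pyRange 0 (j : Int) 1 ++ [(j : Int)] :=
      PySem.List.pyRange_one_succ_right (by positivity)
    have rb : PySem.List.pyRange 1 (((j : Int) + 1) + 1) 1
        = PySem.List.pyRange 1 ((j : Int) + 1) 1 ++ [(j : Int) + 1] :=
      PySem.List.pyRange_one_succ_right (by omega)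
    have hbf : pvBf data mod (j + 1)
        = pvStepB data mod (pvBf data mod j) ((j : Int) + 1) := by
      simp only [pvBf, hc, rb, List.foldl_append, List.foldl_cons, List.foldl_nil]
    rw [hc, ra, List.foldl_append, h1, List.foldl_cons, List.foldl_nil, hbf]
    refine ⟨?_, ?_⟩
    · simp only [pvStepA, pvStepB]
      refine Prod.ext rfl (Prod.ext ?_ (Prod.ext (by push_cast; ring) rfl))
      simp only []
      ring
    · simp only [pvStepB]
      simp [h2]

-- closed form of B's single pass (n is the fixed list length used in the guard)
lemma pvFoldB (d w m n : Int) (l : List Int) : ∀ (k0 h0 e0 : Int),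
    (PySem.List.enumerate l k0).foldl (pvStepC d w m n) (h0, e0)
    = (h0 + l.sum,
       e0 + ((List.range l.length).map
          (fun (jj : Nat) => if 2 ≤ k0 + (jj : Int) ∧ k0 + (jj : Int) ≤ n - 1
                    then 2 * PySem.Int.mod (d * w * (h0 + (l.take (jj + 1)).sum)) m else 0)).sum) := by
  induction l with
  | nil => intro k0 h0 e0; simp [PySem.List.enumerate_nil]
  | cons t l ih =>
    intro k0 h0 e0
    rw [PySem.List.enumerate_cons, List.foldl_cons]
    show (PySem.List.enumerate l (k0 + 1)).foldl (pvStepC d w m n)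
        (h0 + t, if 2 ≤ k0 ∧ k0 ≤ n - 1 then e0 + 2 * PySem.Int.mod (d * w * (h0 + t)) m else e0) = _
    rw [ih]
    rw [Prod.mk.injEq]
    refine ⟨by simp [add_assoc], ?_⟩
    rw [List.length_cons, List.range_succ_eq_map, List.map_cons, List.map_map, List.sum_cons]
    have hshift : ∀ jj : Nat,
        (if 2 ≤ (k0 + 1) + (jj : Int) ∧ (k0 + 1) + (jj : Int) ≤ n - 1
          then 2 * PySem.Int.mod (d * w * ((h0 + t) + (l.take (jj + 1)).sum)) m else 0)
        = (if 2 ≤ k0 + ((jj + 1 : Nat) : Int) ∧ k0 + ((jj + 1 : Nat) : Int) ≤ n - 1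
          then 2 * PySem.Int.mod (d * w * (h0 + ((t :: l).take ((jj + 1) + 1)).sum)) m else 0) := by
      intro jj
      have h1 : ((jj + 1 : Nat) : Int) = (jj : Int) + 1 := by push_cast; ring
      rw [h1, List.take_succ_cons, List.sum_cons]
      refine if_congr (by constructor <;> exact fun h => ⟨by omega, by omega⟩) ?_ rfl
      ring_nf
    simp only [hshift]
    have ht1 : ((t :: l).take (0 + 1)).sum = t := by simp
    rw [Function.comp_def]
    push_cast [ht1]
    simp only [Nat.succ_eq_add_one]
    split_ifs <;> first | ring1 | (exfalso; omega)
-- reindex an indicator sum over range (M+1) to the plain sum over range (M-1)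
lemma pvSumShift (M : Nat) (G : Nat → Int) :
    ((List.range (M + 1)).map (fun j => if 1 ≤ j ∧ j < M then G j else 0)).sum
    = ((List.range (M - 1)).map (fun k => G (k + 1))).sum := by
  have l1 : ((List.range (M + 1)).map (fun j => if 1 ≤ j ∧ j < M then G j else 0)).sum
      = ∑ j ∈ Finset.range (M + 1), (if 1 ≤ j ∧ j < M then G j else 0) := rfl
  have l2 : ((List.range (M - 1)).map (fun k => G (k + 1))).sum
      = ∑ k ∈ Finset.range (M - 1), G (k + 1) := rfl
  rw [l1, l2, ← Finset.sum_filter]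
  have hf : (Finset.range (M + 1)).filter (fun j => 1 ≤ j ∧ j < M) = Finset.Ico 1 M := by
    ext x; simp [Finset.mem_filter, Finset.mem_range, Finset.mem_Ico]; omega
  rw [hf, Finset.sum_Ico_eq_sum_range]
  exact Finset.sum_congr rfl (fun i _ => by rw [Nat.add_comm])

-- A's quadratic heights pipeline equals B's single pass, for any reversed thickness list
lemma pvEmpty (d m w : Int) (rev : List Int) (hne : rev ≠ []) :
    (PySem.List.slice ((PySem.List.pyRange 1 ((rev.length : Int) + 1) 1).map
        (fun i => (PySem.List.slice rev none (some i)).sum)) (some 1) (some (-1))).foldl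
      (fun e h => e + 2 * PySem.Int.mod (d * w * h) m) 0
    + PySem.Int.mod (d * w * PySem.List.pyGetD
        ((PySem.List.pyRange 1 ((rev.length : Int) + 1) 1).map
          (fun i => (PySem.List.slice rev none (some i)).sum)) (-1) 0) m
    = ((PySem.List.enumerate rev 1).foldl (pvStepC d w m (rev.length : Int)) (0, 0)).2
      + PySem.Int.mod (d * w *
          ((PySem.List.enumerate rev 1).foldl (pvStepC d w m (rev.length : Int)) (0, 0)).1) m := by
  obtain ⟨M, hM⟩ : ∃ M, rev.length = M + 1 := by
    cases rev with
    | nil => exact absurd rfl hne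
    | cons a l => exact ⟨l.length, rfl⟩
  have heights_eq : (PySem.List.pyRange 1 ((rev.length : Int) + 1) 1).map
        (fun i => (PySem.List.slice rev none (some i)).sum)
      = (List.range rev.length).map (fun k => (rev.take (k + 1)).sum) := by
    rw [PySem.List.pyRange_one, List.map_map]
    rw [show ((rev.length : Int) + 1 - 1).toNat = rev.length from by omega]
    apply List.map_congr_left
    intro k _
    simp only [Function.comp_apply]
    rw [PySem.List.slice_to rev (by positivity)]
    rw [show ((1 : Int) + (k : Int)).toNat = k + 1 from by omega]
  rw [heights_eq, pvSliceOneNegOne, pvFoldB]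
  -- split heights into head :: middle
  have hsplit : (List.range rev.length).map (fun k => (rev.take (k + 1)).sum)
      = (rev.take 1).sum :: (List.range M).map (fun k => (rev.take (k + 2)).sum) := by
    rw [hM, List.range_succ_eq_map, List.map_cons, List.map_map]
    rfl
  have hlast : PySem.List.pyGetD ((List.range rev.length).map (fun k => (rev.take (k + 1)).sum)) (-1) 0
      = rev.sum := by
    rw [hM, List.range_succ, List.map_append, List.map_singleton,
        PySem.List.pyGetD_neg_one_append_singleton, ← hM, List.take_length]
  rw [hlast, hsplit]
  simp only [List.tail_cons, List.length_cons, List.length_map, List.length_range]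
  rw [show M + 1 - 2 = M - 1 from by omega]
  rw [← List.map_take, List.take_range, Nat.min_eq_left (by omega)]
  rw [PySem.List.foldl_add (g := fun h => 2 * PySem.Int.mod (d * w * h) m)]
  rw [List.map_map]
  have hcond : (List.map
        (fun (jj : Nat) => if 2 ≤ 1 + (jj : Int) ∧ 1 + (jj : Int) ≤ (rev.length : Int) - 1
          then 2 * PySem.Int.mod (d * w * (0 + (rev.take (jj + 1)).sum)) m else 0)
        (List.range rev.length)).sum
      = (List.map
        (fun (jj : Nat) => if 1 ≤ jj ∧ jj < M
          then 2 * PySem.Int.mod (d * w * (rev.take (jj + 1)).sum) m else 0)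
        (List.range (M + 1))).sum := by
    rw [hM]
    apply congrArg
    apply List.map_congr_left
    intro jj _
    rw [zero_add]
    refine if_congr ?_ rfl rfl
    push_cast
    omega
  rw [hcond, pvSumShift M (fun jj => 2 * PySem.Int.mod (d * w * (rev.take (jj + 1)).sum) m)]
  simp only [Function.comp_def, zero_add]

-- ===== VERDICT (by name: the statement is the Claim_ definition above) =====
theorem calc_needed_blocks_spec : Claim_equal_calc_needed_blocks := by
  intro layers data mod _ _
  unfold Spec_calc_needed_blocks
  unfold calc_needed_blocks calc_needed_blocks_alt
  have r1 : PySem.List.pyRange 0 (layers - 1) 1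
      = PySem.List.pyRange 0 (((layers - 1).toNat : Nat) : Int) 1 := by
    rw [PySem.List.pyRange_one, PySem.List.pyRange_one]
    exact congrArg (List.map _) (congrArg List.range (by omega))
  have r2 : PySem.List.pyRange 1 layers 1
      = PySem.List.pyRange 1 ((((layers - 1).toNat : Nat) : Int) + 1) 1 := by
    rw [PySem.List.pyRange_one, PySem.List.pyRange_one]
    exact congrArg (List.map _) (congrArg List.range (by omega))
  obtain ⟨h1, h2⟩ := pvBuild data mod (layers - 1).toNat
  rcases hbf : pvBf data mod (layers - 1).toNat with ⟨bt, bb, bts⟩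
  rw [hbf] at h1 h2
  dsimp only at h1 h2
  rw [r1, r2, h1]
  rw [show (PySem.List.pyRange 1 ((((layers - 1).toNat : Nat) : Int) + 1) 1).foldl
        (pvStepB data mod) (1, 1, [1]) = pvBf data mod (layers - 1).toNat from rfl, hbf]
  dsimp only
  rw [PySem.List.slice?_none_none_neg_one]
  dsimp only [Option.getD_some]
  have hbts : bts ≠ [] := by
    intro hnil
    rw [hnil] at h2
    simp at h2
  have hrevne : bts.reverse ≠ [] := by
    simpa [List.reverse_eq_nil_iff] using hbts
  have hn : ((bts.length : Nat) : Int) = ((bts.reverse.length : Nat) : Int) := by simp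
  have hw : (2 : Int) * (bts.reverse.length : Int) - 1 = 2 * (((layers - 1).toNat : Nat) : Int) + 1 := by
    simp only [List.length_reverse, h2]; push_cast; ring
  rw [hn, hw]
  exact congrArg (fun z => bb - z) (pvEmpty data mod (2 * (((layers - 1).toNat : Nat) : Int) + 1) bts.reverse hrevne)
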